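-- pv_equiv track=rewrite | github.com/valbaca/advent-py | advent/year2015/day9.py | go_dist
-- ===== SOURCE A (Python) =====
-- def go_dist(distances, plan, left, dist):
--     if len(left) == 0:
--         return [(plan, left, dist)]
--     plans = []
--     for dest in left:
--         sub_plan = [*plan, dest] # realized we don't actually need to track the full plan
--         sub_left = left.copy()
--         sub_left.remove(dest)
--         plans.extend(go_dist(distances, sub_plan, sub_left, dist + distances[plan[-1]][dest]))
--     return plans
-- ===== SOURCE B (Python) =====
-- from itertools import permutations
--
--
-- def go_dist(distances, plan, left, dist):
--     results = []
--     for perm in permutations(left):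
--         route = plan + list(perm)
--         total = dist
--         for u, v in zip(route[len(plan) - 1:], perm):
--             total += distances[u][v]
--         results.append((route, [], total))
--     return results
-- ===== Notes on version B (the rewrite author's own statement) =====
-- stated objective: idiomatic
-- what changed: Replaces the hand-rolled DFS recursion (copy left, remove the chosen city, recurse, extend) with a flat loop over itertools.permutations(left) that sums each route's legs directly.
import Mathlib
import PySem

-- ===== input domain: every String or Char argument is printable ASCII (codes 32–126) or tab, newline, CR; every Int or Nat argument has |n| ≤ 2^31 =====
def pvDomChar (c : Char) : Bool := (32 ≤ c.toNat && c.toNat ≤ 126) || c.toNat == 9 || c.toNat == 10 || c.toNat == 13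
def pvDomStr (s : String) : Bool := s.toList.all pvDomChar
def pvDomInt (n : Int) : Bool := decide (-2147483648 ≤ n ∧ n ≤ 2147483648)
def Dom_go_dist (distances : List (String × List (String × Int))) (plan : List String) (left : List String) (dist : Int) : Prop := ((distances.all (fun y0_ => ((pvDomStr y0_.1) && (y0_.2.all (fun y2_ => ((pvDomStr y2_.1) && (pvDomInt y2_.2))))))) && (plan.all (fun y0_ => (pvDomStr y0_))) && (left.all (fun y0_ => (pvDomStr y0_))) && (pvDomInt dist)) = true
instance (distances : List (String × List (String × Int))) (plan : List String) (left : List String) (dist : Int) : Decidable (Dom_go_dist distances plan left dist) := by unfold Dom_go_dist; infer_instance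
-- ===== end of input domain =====

-- ===== PORT A =====
-- B replaces A's hand-rolled DFS recursion with a flat loop over itertools.permutations; return values only, no observable mutation.

-- distances[u][v] for a dict of dicts; missing keys (Python KeyError) fall to the
-- default 0, which Pre_go_dist rules out by requiring the keys to exist.
def distLookup (distances : List (String × List (String × Int))) (u v : String) : Int :=
  (((PySem.Dict.mk distances).get? u).bind (fun row => (PySem.Dict.mk row).get? v)).getD 0

def go_dist (distances : List (String × List (String × Int))) (plan : List String) (left : List String) (dist : Int) : List (List String × List String × Int) :=
  if _h : left.length = 0 then [(plan, left, dist)]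
  else
    -- for dest in left: … plans.extend(go_dist(…))
    left.attach.foldl (fun plans dest =>
      let sub_plan := plan ++ [dest.1]
      let sub_left := (PySem.List.remove? left dest.1).getD []
      plans ++ go_dist distances sub_plan sub_left
        (dist + distLookup distances (PySem.List.pyGetD plan (-1) "") dest.1)) []
termination_by left.length
decreasing_by
  have hmem : dest.1 ∈ left := dest.2
  rw [PySem.List.remove?_eq_some_erase left dest.1 hmem]
  have := List.length_erase_of_mem hmem
  simp only [Option.getD_some]
  omega

-- ===== PORT B =====
def go_dist_alt (distances : List (String × List (String × Int))) (plan : List String) (left : List String) (dist : Int) : List (List String × List String × Int) :=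
  (PySem.List.permutations left left.length).foldl (fun results perm =>
    let route := plan ++ perm
    let total := (List.zip (PySem.List.slice route (some ((plan.length : Int) - 1)) none) perm).foldl
      (fun t uv => t + distLookup distances uv.1 uv.2) dist
    results ++ [(route, ([] : List String), total)]) []

-- ===== PRECONDITION & SPEC =====
-- groupedB l: every value's occurrences in l are adjacent (a value recurring later must
-- recur immediately, i.e. whenever x reappears in the tail it is the tail's head)
def groupedB : List String → Bool
  | [] => true
  | x :: t => (!(t.contains x) || (t.head? == some x)) && groupedB t

-- Pre_ excludes: (a) lists `left` in which some city's duplicate occurrences are NOT adjacent,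
-- where A's enumeration order (list.remove removes the FIRST occurrence) is an accidental
-- first-vs-last-match artefact and differs from B's index order; (b) inputs where Python A
-- raises (plan empty with left non-empty: IndexError on plan[-1]; a missing distance key: KeyError).
def Pre_go_dist (distances : List (String × List (String × Int))) (plan : List String) (left : List String) (dist : Int) : Prop :=
  groupedB left = true ∧ (left = [] ∨ plan ≠ []) ∧
  (∀ v ∈ left, (((PySem.Dict.mk distances).get? (plan.getLast?.getD "")).bind (fun row => (PySem.Dict.mk row).get? v)).isSome = true) ∧
  (∀ u ∈ left, ∀ v ∈ left, (u ≠ v ∨ 2 ≤ left.count u) → (((PySem.Dict.mk distances).get? u).bind (fun row => (PySem.Dict.mk row).get? v)).isSome = true)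
instance (distances : List (String × List (String × Int))) (plan : List String) (left : List String) (dist : Int) : Decidable (Pre_go_dist distances plan left dist) := by unfold Pre_go_dist; infer_instance

def pvWitness_go_dist : (List (String × List (String × Int))) × List String × List String × Int :=
  ([("a", [("b", 1)]), ("b", [("a", 2)])], ["a"], ["b"], 0)

def Spec_go_dist (distances : List (String × List (String × Int))) (plan : List String) (left : List String) (dist : Int) (out : List (List String × List String × Int)) : Prop := out = go_dist_alt distances plan left dist
instance (distances : List (String × List (String × Int))) (plan : List String) (left : List String) (dist : Int) (out : List (List String × List String × Int)) : Decidable (Spec_go_dist distances plan left dist out) := by unfold Spec_go_dist; infer_instance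

-- ===== CLAIM (what is proved, stated in full; the proofs are below) =====
def Claim_equal_go_dist : Prop := ∀ (distances : List (String × List (String × Int))) (plan : List String) (left : List String) (dist : Int), Dom_go_dist distances plan left dist → Pre_go_dist distances plan left dist → Spec_go_dist distances plan left dist (go_dist distances plan left dist)

-- ===== LEMMAS AND PROOFS =====

-- total cost of the legs prev -> p0 -> p1 -> …
def chainCost (distances : List (String × List (String × Int))) (prev : String) : List String → Int
  | [] => 0
  | v :: vs => distLookup distances prev v + chainCost distances v vs

lemma zip_foldl_chain (distances : List (String × List (String × Int))) :
    ∀ (perm : List String) (prev : String) (d : Int),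
    (List.zip (prev :: perm) perm).foldl (fun t uv => t + distLookup distances uv.1 uv.2) d
      = d + chainCost distances prev perm := by
  intro perm
  induction perm with
  | nil => intro prev d; simp [chainCost]
  | cons v vs ih =>
    intro prev d
    simp only [List.zip_cons_cons, List.foldl_cons, chainCost, ih]
    ring

-- flatMap over `range len` with xs[i]? equals flatMap over xs itself
lemma range_flatMap_getElem {β : Type} :
    ∀ (xs : List String) (F : String → List β),
    (List.range xs.length).flatMap (fun i => match xs[i]? with
      | none => []
      | some y => F y)
      = xs.flatMap F := by
  intro xs
  induction xs with
  | nil => intro F; simp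
  | cons x t ih =>
    intro F
    rw [List.length_cons, List.range_succ_eq_map, List.flatMap_cons, List.flatMap_map]
    have h1 : (List.range t.length).flatMap
        (fun i => match (x :: t)[i+1]? with
          | none => ([] : List β)
          | some y => F y)
        = (List.range t.length).flatMap (fun i => match t[i]? with
          | none => ([] : List β)
          | some y => F y) := by
      apply List.flatMap_congr
      intro i hi
      simp only [List.getElem?_cons_succ]
    simp only [List.getElem?_cons_zero]
    rw [h1, ih F, List.flatMap_cons]

-- on a grouped list, removing the first occurrence of xs[i] gives the same list as removing index i
lemma grouped_erase_getElem :
    ∀ (xs : List String), groupedB xs = true → ∀ (i : Nat) (h : i < xs.length),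
    xs.erase xs[i] = xs.eraseIdx i := by
  intro xs
  induction xs with
  | nil => intro _ i h; simp at h
  | cons x t ih =>
    intro hg i hlt
    have hg' : (!(t.contains x) || (t.head? == some x)) = true ∧ groupedB t = true := by
      simpa [groupedB, Bool.and_eq_true] using hg
    obtain ⟨hxh, hgt⟩ := hg'
    cases i with
    | zero => simp
    | succ j =>
      have hjt : j < t.length := by simpa using hlt
      have hel : (x :: t)[j+1] = t[j] := by simp
      rw [hel]
      by_cases hx : x = t[j]
      · have hmem : x ∈ t := hx ▸ (t.getElem_mem hjt)
        have hh : t.head? = some x := by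
          have h' := hxh
          simp only [Bool.or_eq_true, Bool.not_eq_eq_eq_not, Bool.not_true,
            List.contains_eq_mem, decide_eq_false_iff_not, beq_iff_eq] at h'
          rcases h' with hc | he
          · exact absurd hmem hc
          · exact he
        obtain ⟨t', rfl⟩ : ∃ t', t = x :: t' := by
          cases t with
          | nil => simp at hh
          | cons a l =>
            have ha : a = x := by simpa using hh
            exact ⟨l, by rw [ha]⟩
        rw [← hx, List.erase_cons_head, List.eraseIdx_cons_succ]
        have h2 := ih hgt j hjt
        rw [← hx] at h2
        rw [List.erase_cons_head] at h2
        rw [← h2]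
      · rw [List.erase_cons_tail (by simpa using hx), List.eraseIdx_cons_succ, ih hgt j hjt]

-- erasing an element keeps a list grouped
lemma groupedB_erase :
    ∀ (xs : List String) (v : String), groupedB xs = true → groupedB (xs.erase v) = true := by
  intro xs
  induction xs with
  | nil => intro v _; simp [groupedB]
  | cons x t ih =>
    intro v hg
    have hg' : (!(t.contains x) || (t.head? == some x)) = true ∧ groupedB t = true := by
      simpa [groupedB, Bool.and_eq_true] using hg
    obtain ⟨hxh, hgt⟩ := hg'
    by_cases hv : x = v
    · rw [hv, List.erase_cons_head]; exact hgt
    · rw [List.erase_cons_tail (by simpa using hv)]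
      have htail : groupedB (t.erase v) = true := ih v hgt
      have hhead : (!((t.erase v).contains x) || ((t.erase v).head? == some x)) = true := by
        by_cases hm : x ∈ t.erase v
        · have hmt : x ∈ t := List.mem_of_mem_erase hm
          have hh : t.head? = some x := by
            have h' := hxh
            simp only [Bool.or_eq_true, Bool.not_eq_eq_eq_not, Bool.not_true,
              List.contains_eq_mem, decide_eq_false_iff_not, beq_iff_eq] at h'
            rcases h' with hc | he
            · exact absurd hmt hc
            · exact he
          obtain ⟨t', rfl⟩ : ∃ t', t = x :: t' := by
            cases t with
            | nil => simp at hh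
            | cons a l =>
              have ha : a = x := by simpa using hh
              exact ⟨l, by rw [ha]⟩
          rw [List.erase_cons_tail (by simpa using hv)]
          simp
        · simp [List.contains_eq_mem, hm]
      simp only [groupedB, Bool.and_eq_true]
      exact ⟨hhead, htail⟩

lemma attach_flatMap {α β : Type} (l : List α) (f : α → List β) :
    l.attach.flatMap (fun d => f d.1) = l.flatMap f := by
  conv_rhs => rw [← List.attach_map_subtype_val l, List.flatMap_map]

lemma perms_succ_grouped (xs : List String) (h : groupedB xs = true) (r : Nat) :
    PySem.List.permutations xs (r+1)
      = xs.flatMap (fun x => (PySem.List.permutations (xs.erase x) r).map (x :: ·)) := by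
  simp only [PySem.List.permutations]
  refine Eq.trans (List.flatMap_congr ?_)
    (range_flatMap_getElem xs (fun y => (PySem.List.permutations (xs.erase y) r).map (y :: ·)))
  intro i hi
  have hlt : i < xs.length := List.mem_range.mp hi
  rw [List.getElem?_eq_getElem hlt]
  show (PySem.List.permutations (xs.eraseIdx i) r).map (xs[i] :: ·)
      = (PySem.List.permutations (xs.erase xs[i]) r).map (xs[i] :: ·)
  rw [grouped_erase_getElem xs h i hlt]

lemma go_dist_eq_perms (distances : List (String × List (String × Int))) :
    ∀ (n : Nat) (left plan : List String) (dist : Int), left.length = n → groupedB left = true → plan ≠ [] →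
    go_dist distances plan left dist
      = (PySem.List.permutations left n).map
          (fun perm => (plan ++ perm, ([] : List String),
            dist + chainCost distances (PySem.List.pyGetD plan (-1) "") perm)) := by
  intro n
  induction n with
  | zero =>
    intro left plan dist hlen _ _
    have hnil : left = [] := List.eq_nil_of_length_eq_zero hlen
    subst hnil
    simp [go_dist, PySem.List.permutations, chainCost]
  | succ m ih =>
    intro left plan dist hlen hg hp
    rw [go_dist]
    rw [dif_neg (by omega)]
    rw [PySem.List.foldl_append_eq_flatMap]
    rw [List.nil_append]
    have hstep : left.attach.flatMap (fun dest =>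
        go_dist distances (plan ++ [dest.1]) ((PySem.List.remove? left dest.1).getD [])
          (dist + distLookup distances (PySem.List.pyGetD plan (-1) "") dest.1))
        = left.attach.flatMap (fun dest =>
          (PySem.List.permutations (left.erase dest.1) m).map
            (fun perm => (plan ++ dest.1 :: perm, ([] : List String),
              dist + (distLookup distances (PySem.List.pyGetD plan (-1) "") dest.1
                + chainCost distances dest.1 perm)))) := by
      apply List.flatMap_congr
      intro dest _
      have hmem : dest.1 ∈ left := dest.2
      rw [PySem.List.remove?_eq_some_erase left dest.1 hmem, Option.getD_some]
      rw [ih (left.erase dest.1) (plan ++ [dest.1])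
          (dist + distLookup distances (PySem.List.pyGetD plan (-1) "") dest.1)
          (by have := List.length_erase_of_mem hmem; omega)
          (groupedB_erase left dest.1 hg) (by simp)]
      apply List.map_congr_left
      intro perm _
      rw [PySem.List.pyGetD_neg_one_append_singleton]
      simp [List.append_assoc, add_assoc]
    rw [hstep]
    rw [attach_flatMap left (fun x =>
          (PySem.List.permutations (left.erase x) m).map
            (fun perm => (plan ++ x :: perm, ([] : List String),
              dist + (distLookup distances (PySem.List.pyGetD plan (-1) "") x
                + chainCost distances x perm))))]
    rw [perms_succ_grouped left hg m, List.map_flatMap]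
    apply List.flatMap_congr
    intro x _
    rw [List.map_map]
    apply List.map_congr_left
    intro perm _
    simp [chainCost, Function.comp]

lemma drop_pred_length (plan : List String) (hp : plan ≠ []) :
    plan.drop (plan.length - 1) = [plan.getLast hp] := by
  induction plan with
  | nil => exact absurd rfl hp
  | cons x t ih =>
    cases t with
    | nil => simp
    | cons y s =>
      have := ih (by simp)
      simpa [List.getLast] using this

lemma alt_eq_perms (distances : List (String × List (String × Int)))
    (left plan : List String) (dist : Int) (hp : plan ≠ []) :
    go_dist_alt distances plan left dist
      = (PySem.List.permutations left left.length).map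
          (fun perm => (plan ++ perm, ([] : List String),
            dist + chainCost distances (PySem.List.pyGetD plan (-1) "") perm)) := by
  rw [go_dist_alt]
  rw [PySem.List.foldl_append_singleton_eq_map, List.nil_append]
  apply List.map_congr_left
  intro perm _
  have hcast : ((plan.length : Int) - 1) = ((plan.length - 1 : Nat) : Int) := by
    have : 1 ≤ plan.length := List.length_pos_iff.mpr hp
    omega
  have hslice : PySem.List.slice (plan ++ perm) (some ((plan.length : Int) - 1)) none
      = plan.getLast hp :: perm := by
    rw [hcast, PySem.List.slice_from_natCast]
    rw [List.drop_append_of_le_length (by omega)]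
    rw [drop_pred_length plan hp]
    simp
  simp only [hslice]
  rw [zip_foldl_chain]
  rw [show PySem.List.pyGetD plan (-1) "" = plan.getLast hp from PySem.List.pyGetD_neg_one plan "" hp]

-- ===== VERDICT (by name: the statement is the Claim_ definition above) =====
theorem go_dist_spec : Claim_equal_go_dist := by
  intro distances plan left dist _hdom hpre
  obtain ⟨hg, hcase, -, -⟩ := hpre
  unfold Spec_go_dist
  rcases hcase with hleft | hplan
  · subst hleft
    simp [go_dist, go_dist_alt]
  · rw [go_dist_eq_perms distances left.length left plan dist rfl hg hplan,
        alt_eq_perms distances left plan dist hplan]
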